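-- pv_equiv track=rewrite | github.com/Arctia/DRPGWiki_filler | StageEnemy.py | DList
-- ===== SOURCE A (Python) =====
-- def DList(name, e):
-- 	string = ""
-- 	for i in range(6):
-- 		string += f"""| {name}_{i+1} = """
-- 		if i < e[name].__len__():
-- 			string += str(e[name][i]) + "\n"
-- 		else:
-- 			string += "0\n"
-- 	return string
-- ===== SOURCE B (Python) =====
-- def DList(name, e):
-- 	vs = e[name]
-- 	vals = list(vs[:6]) + [0] * (6 - len(vs))
-- 	return "\n".join(f"| {name}_{i+1} = {vals[i]}" for i in range(6)) + "\n"
-- ===== Notes on version B (the rewrite author's own statement) =====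
-- stated objective: simpler
-- what changed: B pads the value list to length 6 up front (slice + padding) and then emits all six lines in one uniform branch-free join, instead of A's loop that re-looks up e[name] and branches on the index against the length at every iteration.
import Mathlib
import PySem

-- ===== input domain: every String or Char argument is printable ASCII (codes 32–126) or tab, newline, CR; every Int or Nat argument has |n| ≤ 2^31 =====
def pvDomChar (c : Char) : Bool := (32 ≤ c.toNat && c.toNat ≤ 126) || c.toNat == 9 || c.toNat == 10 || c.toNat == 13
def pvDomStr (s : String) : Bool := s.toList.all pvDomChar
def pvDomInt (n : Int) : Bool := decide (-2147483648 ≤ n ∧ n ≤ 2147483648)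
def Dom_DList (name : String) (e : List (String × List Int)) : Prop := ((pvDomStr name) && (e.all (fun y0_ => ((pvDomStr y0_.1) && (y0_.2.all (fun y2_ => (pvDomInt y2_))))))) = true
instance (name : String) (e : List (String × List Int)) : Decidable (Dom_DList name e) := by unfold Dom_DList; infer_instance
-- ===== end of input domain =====

-- B pads the values to length 6 up front and emits the six lines with one uniform join; A loops with a per-index length branch.

-- ===== PORT A =====
-- A's loop over range(6); e[name] (KeyError when absent — excluded by Pre_) is looked up inside the loop each time, as in A.
def DList (name : String) (e : List (String × List Int)) : String :=
  (PySem.List.pyRange 0 6 1).foldl (fun s i =>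
    match (PySem.Dict.mk e).get? name with
    | none => s   -- unreachable under Pre_DList (Python raises KeyError here)
    | some vs =>
      let s := s ++ "| " ++ name ++ "_" ++ PySem.Int.toStr (i + 1) ++ " = "
      if i < (vs.length : Int) then
        s ++ PySem.Int.toStr (PySem.List.pyGetD vs i 0) ++ "\n"
      else
        s ++ "0\n") ""

-- ===== PORT B =====
-- vals = vs[:6] + [0]*(6-len(vs)); vals[i] is always in range (vals has length 6), ported as getD.
def DList_alt (name : String) (e : List (String × List Int)) : String :=
  match (PySem.Dict.mk e).get? name with
  | none => ""   -- unreachable under Pre_DList (Python raises KeyError here)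
  | some vs =>
    let vals := vs.take 6 ++ List.replicate (6 - vs.length) 0
    PySem.Str.join "\n" ((List.range 6).map (fun (i : Nat) =>
      "| " ++ name ++ "_" ++ PySem.Int.toStr ((i : Int) + 1) ++ " = " ++ PySem.Int.toStr (vals.getD i 0))) ++ "\n"

-- ===== PRECONDITION & SPEC =====
-- Pre_ excludes exactly the inputs where name is not a key of e: there Python A (and B) raise KeyError.
def Pre_DList (name : String) (e : List (String × List Int)) : Prop :=
  ((PySem.Dict.mk e).get? name).isSome = true
instance (name : String) (e : List (String × List Int)) : Decidable (Pre_DList name e) := by unfold Pre_DList; infer_instance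
def pvWitness_DList : String × (List (String × List Int)) := ("x", [("x", [1, 2])])

def Spec_DList (name : String) (e : List (String × List Int)) (out : String) : Prop := out = DList_alt name e
instance (name : String) (e : List (String × List Int)) (out : String) : Decidable (Spec_DList name e out) := by unfold Spec_DList; infer_instance

-- ===== CLAIM (what is proved, stated in full; the proofs are below) =====
def Claim_equal_DList : Prop := ∀ (name : String) (e : List (String × List Int)), Dom_DList name e → Pre_DList name e → Spec_DList name e (DList name e)

-- ===== LEMMAS AND PROOFS =====

theorem pv_join_cons (s a b : String) (l : List String) :
    PySem.Str.join s (a :: b :: l) = a ++ s ++ PySem.Str.join s (b :: l) := by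
  apply String.toList_injective
  simp [PySem.Str.join, PySem.Chars.join_cons_cons]

theorem pv_join_singleton (s a : String) : PySem.Str.join s [a] = a := by
  apply String.toList_injective
  simp [PySem.Str.join, PySem.Chars.join_singleton]

theorem pv_body (s x : String) (c : Prop) [Decidable c] :
    (if c then s ++ x ++ "\n" else s ++ "0\n") = s ++ (if c then x ++ "\n" else "0\n") := by
  split_ifs <;> simp [String.append_assoc]

theorem pv_step (vs : List Int) (i : Int) (h0 : 0 ≤ i) (h6 : i < 6) :
    (if i < (vs.length : Int) then PySem.Int.toStr (PySem.List.pyGetD vs i 0) ++ "\n" else "0\n")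
    = PySem.Int.toStr ((vs.take 6 ++ List.replicate (6 - vs.length) 0).getD i.toNat 0) ++ "\n" := by
  by_cases h : i < (vs.length : Int)
  · rw [if_pos h]
    have h1 : PySem.List.pyGetD vs i 0 = vs.getD i.toNat 0 := by
      simp [PySem.List.pyGetD, PySem.List.pyGet?, PySem.List.pyIdx?, h0, h, List.getD_eq_getElem?_getD]
    have h2 : (vs.take 6 ++ List.replicate (6 - vs.length) 0).getD i.toNat 0 = vs.getD i.toNat 0 := by
      rw [List.getD_eq_getElem?_getD, List.getD_eq_getElem?_getD,
        List.getElem?_append_left (by simp; omega), List.getElem?_take_of_lt (by omega)]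
    rw [h1, h2]
  · rw [if_neg h]
    have h2 : (vs.take 6 ++ List.replicate (6 - vs.length) 0).getD i.toNat 0 = 0 := by
      rw [List.getD_eq_getElem?_getD, List.getElem?_append_right (by simp; omega)]
      have hm : min 6 vs.length = vs.length := by omega
      have hc : i.toNat - vs.length < 6 - vs.length := by omega
      simp [hm, hc]
    rw [h2]
    have h3 : PySem.Int.toStr 0 = "0" := by decide
    rw [h3]
    apply String.toList_injective
    simp

-- ===== VERDICT (by name: the statement is the Claim_ definition above) =====
theorem DList_spec : Claim_equal_DList := by
  intro name e hdom hpre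
  unfold Spec_DList DList DList_alt
  obtain ⟨vs, h⟩ := Option.isSome_iff_exists.mp hpre
  have hr : PySem.List.pyRange 0 6 1 = [0, 1, 2, 3, 4, 5] := by decide
  rw [hr]
  simp only [h, List.foldl, List.range_succ, pv_body]
  rw [pv_step vs 0 (by norm_num) (by norm_num), pv_step vs 1 (by norm_num) (by norm_num),
    pv_step vs 2 (by norm_num) (by norm_num), pv_step vs 3 (by norm_num) (by norm_num),
    pv_step vs 4 (by norm_num) (by norm_num), pv_step vs 5 (by norm_num) (by norm_num)]
  norm_num
  simp only [pv_join_cons, pv_join_singleton]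
  apply String.toList_injective
  simp
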